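-- pv_equiv track=rewrite | github.com/1021ky/daily-coding | 2026-02-05/src/main.py | solve
-- ===== SOURCE A (Python) =====
-- def fill_in(field, width, height, x, y):
--     set_cell(field, x, y, ".")
--
--     x_targets = set([x - 1 if x - 1 >= 0 else x, x, x + 1 if x + 1 < width else x])
--     y_targets = set([y - 1 if y - 1 >= 0 else y, y, y + 1 if y + 1 < height else y])
--     for x_target in x_targets:
--         for y_target in y_targets:
--             if get_cell(field, x_target, y_target) == "W":
--                 fill_in(field, width, height, x_target, y_target)
--
-- def solve(field, width, height):
--     count = 0
--     # 全要素見て、水があったら塗りつぶす。塗りつぶした回数が水たまりの数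
--     for x_pos in range(width):
--         for y_pos in range(height):
--             if get_cell(x=x_pos, y=y_pos, field=field) == "W":
--                 # 塗りつぶして重複カウントしないようにする
--                 fill_in(field=field, width=width, height=height, x=x_pos, y=y_pos)
--                 count += 1
--     return count
--
-- def get_cell(field, x, y):
--     assert x >= 0 and x < len(field[0]) and y < len(field) and y >= 0
--     return field[y][x]
--
-- def set_cell(field, x, y, value):
--     assert x >= 0 and x < len(field[0]) and y < len(field) and y >= 0
--     field[y][x] = value
-- ===== SOURCE B (Python) =====
-- def solve(field, width, height):
--     # Iterative flood fill with an explicit stack and direct indexing; pools are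
--     # collected as their seed cells and counted at the end. Mutates field in
--     # place like the original (every cell of a pool becomes ".").
--     pools = []
--     for x_pos, y_pos in ((x, y) for x in range(width) for y in range(height)):
--         if field[y_pos][x_pos] == "W":
--             pools.append((x_pos, y_pos))
--             stack = [(x_pos, y_pos)]
--             while stack:
--                 x, y = stack.pop()
--                 if field[y][x] == "W":
--                     field[y][x] = "."
--                     stack.extend(reversed([(nx, ny)
--                                            for nx in range(max(x - 1, 0), min(x + 1, width - 1) + 1)
--                                            for ny in range(max(y - 1, 0), min(y + 1, height - 1) + 1)]))
--     return len(pools)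
-- ===== Notes on version B (the rewrite author's own statement) =====
-- stated objective: alternative
-- what changed: fill_in's recursive flood fill via get_cell/set_cell helpers and Python-set neighbour building is replaced by an explicit-stack iterative fill with direct indexing, clamped nested-range neighbour generation, and a collected list of pool seed cells whose length is returned.
import Mathlib
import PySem

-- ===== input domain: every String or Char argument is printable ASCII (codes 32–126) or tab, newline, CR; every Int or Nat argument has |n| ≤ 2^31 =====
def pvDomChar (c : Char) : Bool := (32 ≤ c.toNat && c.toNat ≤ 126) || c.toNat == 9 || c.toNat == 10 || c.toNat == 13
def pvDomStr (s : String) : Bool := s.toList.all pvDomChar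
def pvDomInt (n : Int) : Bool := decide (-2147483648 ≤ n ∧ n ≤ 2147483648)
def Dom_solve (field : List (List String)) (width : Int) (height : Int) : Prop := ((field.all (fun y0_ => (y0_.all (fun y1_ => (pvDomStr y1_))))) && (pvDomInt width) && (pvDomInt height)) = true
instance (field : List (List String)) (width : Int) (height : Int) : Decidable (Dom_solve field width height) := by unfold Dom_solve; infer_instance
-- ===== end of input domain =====

-- B replaces fill_in's recursive flood fill by an explicit-stack iterative one with direct indexing,
-- clamped-range neighbour generation and a collected seed list counted at the end; equivalence is
-- about the RETURN value (both Pythons blank each pool's cells in place alike).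

-- ===== PORT A =====
-- get_cell / set_cell: under Pre_solve every access is in range, so the asserts hold and the defaults are never used.
def pvCell (f : List (List String)) (x y : Int) : String :=
  (f.getD y.toNat []).getD x.toNat ""

def pvSet (f : List (List String)) (x y : Int) (v : String) : List (List String) :=
  f.set y.toNat ((f.getD y.toNat []).set x.toNat v)

-- x_targets × y_targets of fill_in: Python-set dedup in insertion order; the returned count does not
-- depend on the visiting order of this set (the whole pool is blanked either way).
def pvTargets (w h x y : Int) : List (Int × Int) :=
  (PySem.Set.ofList [if x - 1 ≥ 0 then x - 1 else x, x, if x + 1 < w then x + 1 else x]).flatMap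
    (fun a => (PySem.Set.ofList [if y - 1 ≥ 0 then y - 1 else y, y, if y + 1 < h then y + 1 else y]).map
      (fun b => (a, b)))

-- fill_in, literal recursion; the Nat fuel is a totality guard only (depth ≤ number of "W" cells < the
-- fuel solve passes, proved by the stability lemmas below).
mutual
def fillIn : Nat → List (List String) → Int → Int → Int → Int → List (List String)
  | 0, f, _, _, _, _ => f
  | Nat.succ k, f, w, h, x, y => fillGo k (pvSet f x y ".") w h (pvTargets w h x y)
  termination_by k _ _ _ _ _ => (k, 0)

def fillGo : Nat → List (List String) → Int → Int → List (Int × Int) → List (List String)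
  | _, f, _, _, [] => f
  | k, f, w, h, q :: qs =>
    if pvCell f q.1 q.2 = "W" then fillGo k (fillIn k f w h q.1 q.2) w h qs
    else fillGo k f w h qs
  termination_by k _ _ _ l => (k, l.length + 1)
end

def solve (field : List (List String)) (width : Int) (height : Int) : Int :=
  let N := (field.map List.length).sum + 1   -- fuel bound (totality guard only)
  ((PySem.List.pyRange 0 width 1).foldl (fun st x =>
      (PySem.List.pyRange 0 height 1).foldl
        (fun (st : List (List String) × Int) y =>
          if pvCell st.1 x y = "W" then (fillIn N st.1 width height x y, st.2 + 1) else st)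
        st)
    (field, 0)).2

-- ===== PORT B =====
-- field[y][x] == "W"  (direct indexing; under Pre_solve the lookups always hit)
def isW (f : List (List String)) (x y : Int) : Bool :=
  PySem.List.pyGet? ((PySem.List.pyGet? f y).getD []) x == some "W"

-- field[y][x] = "."
def blank (f : List (List String)) (x y : Int) : List (List String) :=
  f.modify y.toNat (fun r => r.set x.toNat ".")

-- the clamped 3x3 neighbourhood as two nested ranges (Source B's comprehension)
def nbrs (w h x y : Int) : List (Int × Int) :=
  (PySem.List.pyRange (max (x - 1) 0) (min (x + 1) (w - 1) + 1) 1).flatMap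
    (fun nx => (PySem.List.pyRange (max (y - 1) 0) (min (y + 1) (h - 1) + 1) 1).map
      (fun ny => (nx, ny)))

-- Source B's while-loop: the stack is modelled with its TOP at the head, so Python's
-- `stack.extend(reversed(targets)); …; stack.pop()` becomes `nbrs … ++ rest`.
-- Fuel is a totality guard only (iterations ≤ 1 + 9 · number of "W" cells < the fuel solve_alt passes).
def drain : Nat → List (List String) → Int → Int → List (Int × Int) → List (List String)
  | 0, f, _, _, _ => f
  | _ + 1, f, _, _, [] => f
  | Nat.succ k, f, w, h, (x, y) :: rest =>
    if isW f x y then drain k (blank f x y) w h (nbrs w h x y ++ rest)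
    else drain k f w h rest

def solve_alt (field : List (List String)) (width : Int) (height : Int) : Int :=
  let M := 10 * ((field.map List.length).sum + 1)   -- fuel bound (totality guard only)
  ((((PySem.List.pyRange 0 width 1).flatMap (fun x =>
        (PySem.List.pyRange 0 height 1).map (fun y => (x, y)))).foldl
      (fun (st : List (List String) × List (Int × Int)) c =>
        if isW st.1 c.1 c.2 then (drain M st.1 width height [c], st.2 ++ [c]) else st)
      (field, [])).2.length : Int)

-- ===== PRECONDITION & SPEC =====
-- Pre_solve = exactly the inputs where A's asserts and row indexing succeed: whenever both ranges are
-- nonempty, the grid has at least `height` rows and each scanned row has at least `width` cells.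
def Pre_solve (field : List (List String)) (width : Int) (height : Int) : Prop :=
  (0 < width ∧ 0 < height) →
    (height ≤ (field.length : Int) ∧ ∀ r ∈ field.take height.toNat, width ≤ (r.length : Int))

instance (field : List (List String)) (width : Int) (height : Int) : Decidable (Pre_solve field width height) := by
  unfold Pre_solve; infer_instance

def pvWitness_solve : List (List String) × Int × Int := ([["W", "."], [".", "W"]], 2, 2)

def Spec_solve (field : List (List String)) (width : Int) (height : Int) (out : Int) : Prop := out = solve_alt field width height
instance (field : List (List String)) (width : Int) (height : Int) (out : Int) : Decidable (Spec_solve field width height out) := by unfold Spec_solve; infer_instance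

-- ===== CLAIM (what is proved, stated in full; the proofs are below) =====
def Claim_equal_solve : Prop := ∀ (field : List (List String)) (width : Int) (height : Int), Dom_solve field width height → Pre_solve field width height → Spec_solve field width height (solve field width height)

-- ===== LEMMAS AND PROOFS =====

-- number of "W" cells
def pvWc (f : List (List String)) : Nat := (f.map (fun r => r.count "W")).sum

-- canonical (fuel-saturated) sequence of conditional fills, the common meeting point of both ports
def pvChain (w h : Int) : List (Int × Int) → List (List String) → List (List String)
  | [], f => f
  | q :: qs, f =>
    pvChain w h qs (if pvCell f q.1 q.2 = "W" then fillIn (pvWc f + 1) f w h q.1 q.2 else f)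

-- B's direct test agrees with A's get_cell for nonnegative coordinates
theorem isW_eq (f : List (List String)) (x y : Int) (hx : 0 ≤ x) (hy : 0 ≤ y) :
    (isW f x y = true) ↔ pvCell f x y = "W" := by
  unfold isW pvCell
  rw [PySem.List.pyGet?_of_nonneg f hy, PySem.List.pyGet?_of_nonneg _ hx,
    List.getD_eq_getElem?_getD, List.getD_eq_getElem?_getD]
  cases h : (f[y.toNat]?.getD [])[x.toNat]? with
  | none => simp
  | some s => simp

-- B's in-place row update is A's set_cell
theorem blank_eq (f : List (List String)) (x y : Int) :
    blank f x y = pvSet f x y "." := by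
  unfold blank pvSet
  rw [List.modify_eq_set, List.getD_eq_getElem?_getD]
  rfl

theorem ofList3_eq (a b c : Int) :
    PySem.Set.ofList [a, b, c] =
      if a = b then (if b = c then [b] else [b, c])
      else if a = c then [a, b] else if b = c then [a, b] else [a, b, c] := by
  simp only [PySem.Set.ofList, List.foldl, PySem.Set.add, PySem.Set.contains]
  by_cases hab : a = b <;> by_cases hbc : b = c <;> by_cases hac : a = c <;>
    subst_eqs <;> simp_all [List.mem_cons, eq_comm]

-- B's clamped range is exactly A's x_targets insertion order (for an in-range coordinate)
theorem rangeSet (x w : Int) (h0 : 0 ≤ x) (hw : x < w) :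
    PySem.List.pyRange (max (x - 1) 0) (min (x + 1) (w - 1) + 1) 1 =
      PySem.Set.ofList [if x - 1 ≥ 0 then x - 1 else x, x, if x + 1 < w then x + 1 else x] := by
  rw [ofList3_eq]
  by_cases h1 : x - 1 ≥ 0 <;> by_cases h2 : x + 1 < w
  · -- interior: [x-1, x, x+1]
    rw [if_pos h1, if_pos h2, if_neg (by omega), if_neg (by omega), if_neg (by omega)]
    have e1 : max (x - 1) 0 = x - 1 := by omega
    have e2 : min (x + 1) (w - 1) = x + 1 := by omega
    rw [e1, e2, PySem.List.pyRange_one_cons (by omega), PySem.List.pyRange_one_cons (by omega),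
      PySem.List.pyRange_one_cons (by omega), PySem.List.pyRange_one_eq_nil (by omega)]
    norm_num
  · -- right edge: [x-1, x]
    rw [if_pos h1, if_neg h2, if_neg (by omega), if_neg (by omega), if_pos rfl]
    have e1 : max (x - 1) 0 = x - 1 := by omega
    have e2 : min (x + 1) (w - 1) = x := by omega
    rw [e1, e2, PySem.List.pyRange_one_cons (by omega), PySem.List.pyRange_one_cons (by omega),
      PySem.List.pyRange_one_eq_nil (by omega)]
    norm_num
  · -- left edge: [x, x+1]
    rw [if_neg h1, if_pos h2, if_pos rfl, if_neg (by omega)]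
    have e0 : x = 0 := by omega
    subst e0
    rw [PySem.List.pyRange_one_cons (by omega), PySem.List.pyRange_one_cons (by omega),
      PySem.List.pyRange_one_eq_nil (by omega)]
    norm_num
  · -- single column: [x]
    rw [if_neg h1, if_neg h2, if_pos rfl, if_pos rfl]
    have e0 : x = 0 := by omega
    subst e0
    rw [PySem.List.pyRange_one_cons (by omega), PySem.List.pyRange_one_eq_nil (by omega)]
    norm_num

theorem nbrs_eq (w h x y : Int) (hx0 : 0 ≤ x) (hxw : x < w) (hy0 : 0 ≤ y) (hyh : y < h) :
    nbrs w h x y = pvTargets w h x y := by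
  unfold nbrs pvTargets
  rw [rangeSet x w hx0 hxw, rangeSet y h hy0 hyh]

theorem nbrs_bounds (w h x y : Int) :
    ∀ p ∈ nbrs w h x y, 0 ≤ p.1 ∧ p.1 < w ∧ 0 ≤ p.2 ∧ p.2 < h := by
  intro p hp
  unfold nbrs at hp
  simp only [List.mem_flatMap, List.mem_map] at hp
  obtain ⟨nx, hnx, ny, hny, rfl⟩ := hp
  rw [PySem.List.mem_pyRange_one] at hnx hny
  exact ⟨by omega, by omega, by omega, by omega⟩

theorem nbrs_len_le (w h x y : Int) : (nbrs w h x y).length ≤ 9 := by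
  unfold nbrs
  rw [List.length_flatMap]
  have hb := List.sum_le_card_nsmul
    ((PySem.List.pyRange (max (x - 1) 0) (min (x + 1) (w - 1) + 1) 1).map
      (fun nx => ((PySem.List.pyRange (max (y - 1) 0) (min (y + 1) (h - 1) + 1) 1).map
        (fun ny => (nx, ny))).length)) 3
    (by intro v hv
        simp only [List.mem_map] at hv
        obtain ⟨a, _, rfl⟩ := hv
        rw [List.length_map, PySem.List.length_pyRange_one]
        omega)
  simp only [List.length_map, smul_eq_mul, PySem.List.length_pyRange_one] at hb ⊢
  omega

theorem rcount_set_le (r : List String) (m : Nat) :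
    (r.set m ".").count "W" ≤ r.count "W" := by
  induction r generalizing m with
  | nil => simp
  | cons a t ih =>
    cases m with
    | zero =>
      simp only [List.set_cons_zero, List.count_cons]
      split_ifs <;> simp_all
    | succ m => simp only [List.set_cons_succ, List.count_cons]; have := ih m; omega

theorem rcount_set_lt (r : List String) (m : Nat) (h : r.getD m "" = "W") :
    (r.set m ".").count "W" < r.count "W" := by
  induction r generalizing m with
  | nil => simp at h
  | cons a t ih =>
    cases m with
    | zero =>
      simp only [List.getD_cons_zero] at h
      subst h
      simp only [List.set_cons_zero, List.count_cons]
      have := rcount_set_le t 0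
      simp_all
    | succ m =>
      simp only [List.getD_cons_succ] at h
      simp only [List.set_cons_succ, List.count_cons]
      have := ih m h; omega

theorem pvWc_aux_le (f : List (List String)) (n : Nat) (row' : List String)
    (h : row'.count "W" ≤ (f.getD n []).count "W") :
    pvWc (f.set n row') ≤ pvWc f := by
  induction f generalizing n with
  | nil => simp [pvWc]
  | cons a t ih =>
    cases n with
    | zero => simp_all [pvWc]
    | succ n =>
      simp only [List.getD_cons_succ] at h
      simp only [pvWc, List.set_cons_succ, List.map_cons, List.sum_cons]
      have := ih n h
      simp only [pvWc] at this
      omega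

theorem pvWc_aux_lt (f : List (List String)) (n : Nat) (row' : List String)
    (hn : n < f.length) (h : row'.count "W" < (f.getD n []).count "W") :
    pvWc (f.set n row') < pvWc f := by
  induction f generalizing n with
  | nil => simp at hn
  | cons a t ih =>
    cases n with
    | zero => simp_all [pvWc]
    | succ n =>
      simp only [List.getD_cons_succ] at h
      simp only [pvWc, List.set_cons_succ, List.map_cons, List.sum_cons]
      have := ih n (by simpa using hn) h
      simp only [pvWc] at this
      omega

theorem pvWc_set_le (f : List (List String)) (x y : Int) :
    pvWc (pvSet f x y ".") ≤ pvWc f :=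
  pvWc_aux_le f y.toNat _ (rcount_set_le _ _)

theorem pvWc_set_lt (f : List (List String)) (x y : Int) (h : pvCell f x y = "W") :
    pvWc (pvSet f x y ".") < pvWc f := by
  have hn : y.toNat < f.length := by
    by_contra hc
    have hd : f.getD y.toNat [] = [] := List.getD_eq_default _ _ (by omega)
    simp only [pvCell, hd, List.getD_nil] at h
    exact absurd h (by decide)
  exact pvWc_aux_lt f y.toNat _ hn (rcount_set_lt _ _ h)

theorem shape_pvSet (f : List (List String)) (x y : Int) (v : String) :
    (pvSet f x y v).map List.length = f.map List.length := by
  unfold pvSet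
  by_cases hn : y.toNat < f.length
  · rw [List.map_set, List.length_set, List.getD_eq_getElem f [] hn,
      ← List.getElem_map (f := List.length), List.set_getElem_self]
    simpa using hn
  · rw [List.set_eq_of_length_le (by omega)]

theorem pvWc_fill_le (k : Nat) :
    (∀ f w h x y, pvWc (fillIn k f w h x y) ≤ pvWc f) ∧
    (∀ ts f w h, pvWc (fillGo k f w h ts) ≤ pvWc f) := by
  induction k with
  | zero =>
    refine ⟨fun f w h x y => by simp [fillIn], ?_⟩
    intro ts
    induction ts with
    | nil => intro f w h; simp [fillGo]
    | cons q qs ihts =>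
      intro f w h
      simp only [fillGo, fillIn]
      split_ifs with hw
      · exact ihts _ _ _
      · exact ihts _ _ _
  | succ k ih =>
    have hfi : ∀ f w h x y, pvWc (fillIn (k + 1) f w h x y) ≤ pvWc f := by
      intro f w h x y
      simp only [fillIn]
      exact le_trans (ih.2 _ _ _ _) (pvWc_set_le f x y)
    refine ⟨hfi, ?_⟩
    intro ts
    induction ts with
    | nil => intro f w h; simp [fillGo]
    | cons q qs ihts =>
      intro f w h
      simp only [fillGo]
      split_ifs with hw
      · exact le_trans (ihts _ _ _) (hfi _ _ _ _ _)
      · exact ihts _ _ _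

theorem shape_fill (k : Nat) :
    (∀ f w h x y, (fillIn k f w h x y).map List.length = f.map List.length) ∧
    (∀ ts f w h, (fillGo k f w h ts).map List.length = f.map List.length) := by
  induction k with
  | zero =>
    refine ⟨fun f w h x y => by simp [fillIn], ?_⟩
    intro ts
    induction ts with
    | nil => intro f w h; simp [fillGo]
    | cons q qs ihts =>
      intro f w h
      simp only [fillGo, fillIn]
      split_ifs with hw
      · exact ihts _ _ _
      · exact ihts _ _ _
  | succ k ih =>
    have hfi : ∀ f w h x y, (fillIn (k + 1) f w h x y).map List.length = f.map List.length := by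
      intro f w h x y
      simp only [fillIn]
      exact (ih.2 _ _ _ _).trans (shape_pvSet f x y ".")
    refine ⟨hfi, ?_⟩
    intro ts
    induction ts with
    | nil => intro f w h; simp [fillGo]
    | cons q qs ihts =>
      intro f w h
      simp only [fillGo]
      split_ifs with hw
      · exact (ihts _ _ _).trans (hfi _ _ _ _ _)
      · exact ihts _ _ _

theorem fill_stable (n : Nat) : ∀ (f : List (List String)) (k₁ k₂ : Nat) (w h x y : Int),
    pvWc f ≤ n → pvCell f x y = "W" → pvWc f < k₁ → pvWc f < k₂ →
    fillIn k₁ f w h x y = fillIn k₂ f w h x y := by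
  induction n using Nat.strong_induction_on with
  | _ n IH =>
    intro f k₁ k₂ w h x y hn hW hk₁ hk₂
    obtain ⟨a, rfl⟩ : ∃ a, k₁ = a + 1 := ⟨k₁ - 1, by omega⟩
    obtain ⟨b, rfl⟩ : ∃ b, k₂ = b + 1 := ⟨k₂ - 1, by omega⟩
    simp only [fillIn]
    have hf1 : pvWc (pvSet f x y ".") < pvWc f := pvWc_set_lt f x y hW
    have main : ∀ (ts : List (Int × Int)) (g : List (List String)),
        pvWc g < pvWc f → fillGo a g w h ts = fillGo b g w h ts := by
      intro ts
      induction ts with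
      | nil => intro g _; simp [fillGo]
      | cons q qs ihts =>
        intro g hg
        simp only [fillGo]
        split_ifs with hw
        · have heq : fillIn a g w h q.1 q.2 = fillIn b g w h q.1 q.2 :=
            IH (pvWc g) (by omega) g a b w h q.1 q.2 le_rfl hw (by omega) (by omega)
          rw [heq]
          exact ihts _ (lt_of_le_of_lt ((pvWc_fill_le b).1 g w h q.1 q.2) hg)
        · exact ihts _ hg
    exact main _ _ hf1

theorem pvChain_append (w h : Int) (ts rest : List (Int × Int)) :
    ∀ g, pvChain w h (ts ++ rest) g = pvChain w h rest (pvChain w h ts g) := by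
  induction ts with
  | nil => intro g; simp [pvChain]
  | cons q qs ih => intro g; simp only [List.cons_append, pvChain]; exact ih _

theorem chain_eq_fillGo (w h : Int) : ∀ (ts : List (Int × Int)) (g : List (List String)) (K : Nat),
    pvWc g < K → fillGo K g w h ts = pvChain w h ts g := by
  intro ts
  induction ts with
  | nil => intro g K _; simp [fillGo, pvChain]
  | cons q qs ih =>
    intro g K hK
    simp only [fillGo, pvChain]
    split_ifs with hw
    · rw [fill_stable (pvWc g) g K (pvWc g + 1) w h q.1 q.2 le_rfl hw hK (by omega)]
      exact ih _ K (lt_of_le_of_lt ((pvWc_fill_le (pvWc g + 1)).1 g w h q.1 q.2) hK)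
    · exact ih _ K hK

theorem stack_master (n : Nat) : ∀ (stk : List (Int × Int)) (k : Nat) (f : List (List String)) (w h : Int),
    (∀ p ∈ stk, 0 ≤ p.1 ∧ p.1 < w ∧ 0 ≤ p.2 ∧ p.2 < h) →
    pvWc f ≤ n → stk.length + 9 * pvWc f < k →
    drain k f w h stk = pvChain w h stk f := by
  induction n using Nat.strong_induction_on with
  | _ n IH =>
    intro stk
    induction stk with
    | nil =>
      intro k f w h _ hn hk
      obtain ⟨k', rfl⟩ : ∃ k', k = k' + 1 := ⟨k - 1, by omega⟩
      simp [drain, pvChain]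
    | cons q rest ihstk =>
      intro k f w h hbnd hn hk
      obtain ⟨x, y⟩ := q
      obtain ⟨k', rfl⟩ : ∃ k', k = k' + 1 := ⟨k - 1, by omega⟩
      have hq := hbnd (x, y) (by simp)
      simp only [drain, pvChain]
      by_cases hw : pvCell f x y = "W"
      · rw [if_pos (by rw [isW_eq f x y hq.1 hq.2.2.1]; exact hw), if_pos hw]
        have hf1 : pvWc (blank f x y) < pvWc f := by
          rw [blank_eq]; exact pvWc_set_lt f x y hw
        have hms : drain k' (blank f x y) w h (nbrs w h x y ++ rest)
            = pvChain w h (nbrs w h x y ++ rest) (blank f x y) := by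
          apply IH (pvWc (blank f x y)) (by omega) _ k' _ w h
          · intro p hp
            rcases List.mem_append.1 hp with hp | hp
            · exact nbrs_bounds w h x y p hp
            · exact hbnd p (List.mem_cons_of_mem _ hp)
          · exact le_rfl
          · have hlen : (nbrs w h x y).length ≤ 9 := nbrs_len_le w h x y
            simp only [List.length_append]
            simp only [List.length_cons] at hk
            omega
        rw [hms, pvChain_append]
        congr 1
        rw [nbrs_eq w h x y hq.1 hq.2.1 hq.2.2.1 hq.2.2.2, blank_eq]
        have hdef : fillIn (pvWc f + 1) f w h x y
            = fillGo (pvWc f) (pvSet f x y ".") w h (pvTargets w h x y) := by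
          simp only [fillIn]
        rw [hdef]
        have hf1' : pvWc (pvSet f x y ".") < pvWc f := pvWc_set_lt f x y hw
        exact (chain_eq_fillGo w h (pvTargets w h x y) (pvSet f x y ".") (pvWc f) hf1').symm
      · rw [if_neg (by rw [isW_eq f x y hq.1 hq.2.2.1]; exact hw), if_neg hw]
        apply ihstk k' f w h (fun p hp => hbnd p (List.mem_cons_of_mem _ hp)) hn
        simp only [List.length_cons] at hk
        omega

theorem pvWc_le_tot (f : List (List String)) : pvWc f ≤ (f.map List.length).sum := by
  unfold pvWc
  apply List.sum_le_sum
  intro r _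
  exact List.count_le_length

-- one scan step: A's conditional recursive fill = B's conditional stack drain (coupled states)
theorem step_eq (field : List (List String)) (w h : Int) (f : List (List String)) (x y : Int)
    (hs : f.map List.length = field.map List.length)
    (hx : 0 ≤ x) (hxw : x < w) (hy : 0 ≤ y) (hyh : y < h) (hw : pvCell f x y = "W") :
    fillIn ((field.map List.length).sum + 1) f w h x y
      = drain (10 * ((field.map List.length).sum + 1)) f w h [(x, y)] := by
  have hWc : pvWc f ≤ (field.map List.length).sum := by
    rw [← hs]; exact pvWc_le_tot f
  have h1 : drain (10 * ((field.map List.length).sum + 1)) f w h [(x, y)]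
      = pvChain w h [(x, y)] f :=
    stack_master (pvWc f) [(x, y)] _ f w h
      (by intro p hp; simp only [List.mem_singleton] at hp; subst hp
          exact ⟨hx, hxw, hy, hyh⟩)
      le_rfl (by simp only [List.length_cons, List.length_nil]; omega)
  rw [h1]
  simp only [pvChain, if_pos hw]
  exact fill_stable (pvWc f) f ((field.map List.length).sum + 1) (pvWc f + 1) w h x y
    le_rfl hw (by omega) (by omega)

theorem inner_eq (field : List (List String)) (w h x : Int) (hx : 0 ≤ x ∧ x < w) :
    ∀ (ys : List Int), (∀ y ∈ ys, 0 ≤ y ∧ y < h) →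
    ∀ (stA : List (List String) × Int) (stB : List (List String) × List (Int × Int)),
      stA.1 = stB.1 → stA.2 = (stB.2.length : Int) →
      stA.1.map List.length = field.map List.length →
      (let rA := ys.foldl (fun (st : List (List String) × Int) y =>
          if pvCell st.1 x y = "W" then (fillIn ((field.map List.length).sum + 1) st.1 w h x y, st.2 + 1) else st) stA
       let rB := ys.foldl (fun (st : List (List String) × List (Int × Int)) y =>
          if isW st.1 x y then (drain (10 * ((field.map List.length).sum + 1)) st.1 w h [(x, y)], st.2 ++ [(x, y)]) else st) stB
       rA.1 = rB.1 ∧ rA.2 = (rB.2.length : Int) ∧ rA.1.map List.length = field.map List.length) := by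
  intro ys
  induction ys with
  | nil => intro _ stA stB h1 h2 h3; exact ⟨h1, h2, h3⟩
  | cons y ys ih =>
    intro hys stA stB h1 h2 h3
    have hy := hys y (by simp)
    simp only [List.foldl_cons]
    have hcond : (isW stB.1 x y = true) ↔ pvCell stA.1 x y = "W" := by
      rw [h1]; exact isW_eq stB.1 x y hx.1 hy.1
    by_cases hw : pvCell stA.1 x y = "W"
    · rw [if_pos hw, if_pos (hcond.2 hw)]
      apply ih (fun y hy => hys y (List.mem_cons_of_mem _ hy))
      · simp only
        rw [← h1, step_eq field w h stA.1 x y h3 hx.1 hx.2 hy.1 hy.2 hw]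
      · simp only [List.length_append, List.length_cons, List.length_nil]
        push_cast
        omega
      · simp only
        exact ((shape_fill _).1 stA.1 w h x y).trans h3
    · rw [if_neg hw, if_neg (by simp only [Bool.not_eq_true]; exact Bool.eq_false_iff.2 (fun hc => hw (hcond.1 hc)))]
      exact ih (fun y hy => hys y (List.mem_cons_of_mem _ hy)) stA stB h1 h2 h3

theorem outer_eq (field : List (List String)) (w h : Int) :
    ∀ (xs : List Int), (∀ x ∈ xs, 0 ≤ x ∧ x < w) →
    ∀ (stA : List (List String) × Int) (stB : List (List String) × List (Int × Int)),
      stA.1 = stB.1 → stA.2 = (stB.2.length : Int) →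
      stA.1.map List.length = field.map List.length →
      (let rA := xs.foldl (fun st x => (PySem.List.pyRange 0 h 1).foldl
          (fun (st : List (List String) × Int) y =>
            if pvCell st.1 x y = "W" then (fillIn ((field.map List.length).sum + 1) st.1 w h x y, st.2 + 1) else st) st) stA
       let rB := xs.foldl (fun st x => (PySem.List.pyRange 0 h 1).foldl
          (fun (st : List (List String) × List (Int × Int)) y =>
            if isW st.1 x y then (drain (10 * ((field.map List.length).sum + 1)) st.1 w h [(x, y)], st.2 ++ [(x, y)]) else st) st) stB
       rA.2 = (rB.2.length : Int)) := by
  intro xs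
  induction xs with
  | nil => intro _ stA stB _ h2 _; exact h2
  | cons x xs ih =>
    intro hxs stA stB h1 h2 h3
    simp only [List.foldl_cons]
    have hin := inner_eq field w h x (hxs x (by simp)) (PySem.List.pyRange 0 h 1)
      (fun y hy => by rw [PySem.List.mem_pyRange_one] at hy; exact ⟨hy.1, hy.2⟩)
      stA stB h1 h2 h3
    exact ih (fun x hx => hxs x (List.mem_cons_of_mem _ hx)) _ _ hin.1 hin.2.1 hin.2.2

-- ===== VERDICT (by name: the statement is the Claim_ definition above) =====
theorem solve_spec : Claim_equal_solve := by
  unfold Claim_equal_solve Spec_solve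
  intro field width height _ _
  simp only [solve, solve_alt]
  rw [List.foldl_flatMap]
  simp only [List.foldl_map]
  exact outer_eq field width height (PySem.List.pyRange 0 width 1)
    (fun x hx => by rw [PySem.List.mem_pyRange_one] at hx; exact ⟨hx.1, hx.2⟩)
    (field, 0) (field, []) rfl (by simp) rfl
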